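-- pv_equiv track=rewrite | github.com/trholy/sefuse | shared/taxonomy_contract.py | score_taxonomy_display_value
-- ===== SOURCE A (Python) =====
-- def score_taxonomy_display_value(value: str | None) -> int:
--     if value is None:
--         return -1
--
--     text = str(value)
--     score = 0
--
--     if any(c.isupper() for c in text):
--         score += 2
--     if " " in text:
--         score += 2
--     if "_" in text:
--         score -= 1
--     if text.islower():
--         score -= 1
--
--     return score
-- ===== SOURCE B (Python) =====
-- # Table-driven rewrite: each character is classified once into a 4-bit mask
-- # (upper, space, underscore, lower), the masks are OR-folded over the string,
-- # and the final score is read from a precomputed 16-entry table.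
-- _SCORE_TABLE = [0, 2, 2, 4, -1, 1, 1, 3, -1, 2, 1, 4, -2, 1, 0, 3]
--
--
-- def _char_mask(c):
--     return ((1 if c.isupper() else 0)
--             | (2 if c == " " else 0)
--             | (4 if c == "_" else 0)
--             | (8 if c.islower() else 0))
--
--
-- def score_taxonomy_display_value(value: str | None) -> int:
--     if value is None:
--         return -1
--     mask = 0
--     for c in str(value):
--         mask |= _char_mask(c)
--     return _SCORE_TABLE[mask]
-- ===== Notes on version B (the rewrite author's own statement) =====
-- stated objective: alternative
-- what changed: Replaces A's four separate string scans and conditional score adjustments by a per-character 4-bit class mask OR-folded over the string once, with the final score read from a precomputed 16-entry lookup table.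
import Mathlib
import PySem

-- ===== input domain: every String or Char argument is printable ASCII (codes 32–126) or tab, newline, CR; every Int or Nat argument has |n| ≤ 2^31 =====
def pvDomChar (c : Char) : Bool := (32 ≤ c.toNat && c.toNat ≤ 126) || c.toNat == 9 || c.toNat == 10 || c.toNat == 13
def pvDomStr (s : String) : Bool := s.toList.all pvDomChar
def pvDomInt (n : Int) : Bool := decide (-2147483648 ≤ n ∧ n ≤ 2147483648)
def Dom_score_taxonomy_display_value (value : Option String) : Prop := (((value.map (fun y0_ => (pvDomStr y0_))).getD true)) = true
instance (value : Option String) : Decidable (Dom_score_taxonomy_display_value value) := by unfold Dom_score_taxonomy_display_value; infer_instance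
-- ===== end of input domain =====

-- B replaces A's four separate string scans with a per-character bitmask OR-fold and a
-- precomputed 16-entry score table (objective: alternative, table-driven).


-- ===== PORT A =====
-- helper: Python's str.islower() — at least one lowercase cased char and no upper/titlecase
-- char; exact on the ASCII domain (where titlecase = uppercase and only letters are cased).
def pyStrIslower (cs : List Char) : Bool :=
  cs.any PySem.Chars.islower && !cs.any PySem.Chars.isupper

def score_taxonomy_display_value (value : Option String) : Int :=
  match value with
  | none => -1
  | some text =>
    let score : Int := 0
    let score := if text.toList.any PySem.Chars.isupper then score + 2 else score
    let score := if PySem.Str.isIn " " text then score + 2 else score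
    let score := if PySem.Str.isIn "_" text then score - 1 else score
    let score := if pyStrIslower text.toList then score - 1 else score
    score

-- ===== PORT B =====
def pvScoreTable : List Int := [0, 2, 2, 4, -1, 1, 1, 3, -1, 2, 1, 4, -2, 1, 0, 3]

def pvCharMask (c : Char) : Nat :=
  (if PySem.Chars.isupper c then 1 else 0) |||
  (if c == ' ' then 2 else 0) |||
  (if c == '_' then 4 else 0) |||
  (if PySem.Chars.islower c then 8 else 0)

-- _SCORE_TABLE[mask]: the OR-fold keeps mask < 16, so the list index is always in
-- range and `getD … 0` is exact.
def score_taxonomy_display_value_alt (value : Option String) : Int :=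
  match value with
  | none => -1
  | some text =>
    let mask := text.toList.foldl (fun m c => m ||| pvCharMask c) 0
    pvScoreTable.getD mask 0

-- ===== PRECONDITION & SPEC =====
def Spec_score_taxonomy_display_value (value : Option String) (out : Int) : Prop := out = score_taxonomy_display_value_alt value
instance (value : Option String) (out : Int) : Decidable (Spec_score_taxonomy_display_value value out) := by unfold Spec_score_taxonomy_display_value; infer_instance

-- ===== CLAIM (what is proved, stated in full; the proofs are below) =====
def Claim_equal_score_taxonomy_display_value : Prop := ∀ (value : Option String), Dom_score_taxonomy_display_value value → Spec_score_taxonomy_display_value value (score_taxonomy_display_value value)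

-- ===== LEMMAS AND PROOFS =====
def pvEncode (a b c d : Bool) : Nat :=
  (if a then 1 else 0) ||| (if b then 2 else 0) ||| (if c then 4 else 0) ||| (if d then 8 else 0)

theorem charMask_eq (c : Char) :
    pvCharMask c = pvEncode (PySem.Chars.isupper c) (c == ' ') (c == '_') (PySem.Chars.islower c) := rfl

theorem or_encode (a b c d a' b' c' d' : Bool) :
    pvEncode a b c d ||| pvEncode a' b' c' d' = pvEncode (a || a') (b || b') (c || c') (d || d') := by
  cases a <;> cases b <;> cases c <;> cases d <;> cases a' <;> cases b' <;> cases c' <;> cases d' <;> decide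

theorem fold_mask (cs : List Char) (a b c d : Bool) :
    cs.foldl (fun m ch => m ||| pvCharMask ch) (pvEncode a b c d)
      = pvEncode (a || cs.any PySem.Chars.isupper) (b || cs.any (· == ' '))
          (c || cs.any (· == '_')) (d || cs.any PySem.Chars.islower) := by
  induction cs generalizing a b c d with
  | nil => simp
  | cons x xs ih =>
    rw [List.foldl_cons, charMask_eq, or_encode, ih]
    simp [Bool.or_assoc]

theorem table_encode (a b c d : Bool) :
    pvScoreTable.getD (pvEncode a b c d) 0
      = (if a then (2 : Int) else 0) + (if b then 2 else 0)
        - (if c then 1 else 0) - (if d && !a then 1 else 0) := by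
  cases a <;> cases b <;> cases c <;> cases d <;> decide

theorem isIn_single (c : Char) (sub s : String) (h : sub.toList = [c]) :
    PySem.Str.isIn sub s = s.toList.any (· == c) := by
  rw [Bool.eq_iff_iff, PySem.Str.isIn_iff_infix, h]
  simp only [List.any_eq_true, beq_iff_eq]
  constructor
  · intro hin
    exact ⟨c, List.singleton_sublist.mp hin.sublist, rfl⟩
  · rintro ⟨x, hx, rfl⟩
    obtain ⟨l, r, hh⟩ := List.append_of_mem hx
    exact ⟨l, r, by rw [hh]; simp⟩

-- ===== VERDICT (by name: the statement is the Claim_ definition above) =====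
theorem score_taxonomy_display_value_spec : Claim_equal_score_taxonomy_display_value := by
  intro value _
  unfold Spec_score_taxonomy_display_value
  cases value with
  | none => rfl
  | some text =>
    show (score_taxonomy_display_value (some text)) = _
    have hz : (0 : Nat) = pvEncode false false false false := rfl
    simp only [score_taxonomy_display_value, score_taxonomy_display_value_alt, pyStrIslower,
      hz, fold_mask, Bool.false_or, table_encode]
    have hs : PySem.Str.isIn " " text = text.toList.any (· == ' ') := isIn_single ' ' " " text (by decide)
    have hu : PySem.Str.isIn "_" text = text.toList.any (· == '_') := isIn_single '_' "_" text (by decide)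
    rw [hs, hu]
    split_ifs <;> simp_all
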